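-- pv_equiv track=rewrite | github.com/Emily-OBrien-NHS/WL_multiple_wait_list_analysis | comorb_analysis.py | patient_counts
-- ===== SOURCE A (Python) =====
-- def patient_counts(itemsets, patients):
--     no_patients = []
--     for itemset in itemsets:
--         count = 0
--         for patient in patients:
--             if all(i in patient for i in itemset):
--                 count += 1
--         no_patients.append(count)
--     return no_patients
-- ===== SOURCE B (Python) =====
-- def patient_counts(itemsets, patients):
--     # Inverted index: item -> set of patient indices containing it.
--     index = {}
--     for idx, patient in enumerate(patients):
--         for item in patient:
--             index.setdefault(item, set()).add(idx)
--     n = len(patients)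
--     result = []
--     for itemset in itemsets:
--         if not itemset:
--             result.append(n)
--         else:
--             acc = index.get(itemset[0], set())
--             for item in itemset[1:]:
--                 acc = acc & index.get(item, set())
--             result.append(len(acc))
--     return result
-- ===== Notes on version B (the rewrite author's own statement) =====
-- stated objective: faster
-- what changed: Replaces A's scan of every patient for every itemset by an inverted index (item -> set of patient indices) built once, answering each itemset by intersecting posting sets.
import Mathlib
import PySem

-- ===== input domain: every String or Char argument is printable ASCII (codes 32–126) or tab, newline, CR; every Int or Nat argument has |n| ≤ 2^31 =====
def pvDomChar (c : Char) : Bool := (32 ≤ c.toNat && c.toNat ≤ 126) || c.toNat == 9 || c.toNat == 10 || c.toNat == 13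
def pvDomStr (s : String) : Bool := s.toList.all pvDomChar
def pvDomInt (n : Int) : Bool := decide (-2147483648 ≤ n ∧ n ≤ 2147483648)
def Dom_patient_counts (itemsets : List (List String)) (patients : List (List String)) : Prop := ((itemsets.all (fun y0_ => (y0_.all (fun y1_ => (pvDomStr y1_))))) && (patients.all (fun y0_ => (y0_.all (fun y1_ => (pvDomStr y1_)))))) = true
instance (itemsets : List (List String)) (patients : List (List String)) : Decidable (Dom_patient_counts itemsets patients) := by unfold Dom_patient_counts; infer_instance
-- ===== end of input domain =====

-- B replaces A's per-itemset scan of all patients by an inverted index (item → set of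
-- patient indices) built once, intersecting posting sets per itemset; objective: faster.

-- ===== PORT A =====
def patient_counts (itemsets : List (List String)) (patients : List (List String)) : List Int :=
  itemsets.foldl (fun no_patients itemset =>
    no_patients ++ [patients.foldl (fun count patient =>
      if itemset.all (fun i => patient.contains i) then count + 1 else count) 0]) []

-- ===== PORT B =====
-- index = {}; for idx, patient in enumerate(patients): for item in patient: index.setdefault(item, set()).add(idx)
def pcIndex (patients : List (List String)) : PySem.Dict String (PySem.Set Int) :=
  (PySem.List.enumerate patients).foldl (fun d p =>
    p.2.foldl (fun d item => d.insert item (PySem.Set.add (d.getD item PySem.Set.empty) p.1)) d)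
    PySem.Dict.empty

def patient_counts_alt (itemsets : List (List String)) (patients : List (List String)) : List Int :=
  let index := pcIndex patients
  let n : Int := patients.length
  itemsets.foldl (fun result itemset =>
    result ++ [match itemset with
      | [] => n
      | first :: rest =>
        let acc := rest.foldl (fun acc item => PySem.Set.inter acc (index.getD item PySem.Set.empty))
          (index.getD first PySem.Set.empty)
        (PySem.Set.len acc : Int)]) []

-- ===== PRECONDITION & SPEC =====
def Spec_patient_counts (itemsets : List (List String)) (patients : List (List String)) (out : List Int) : Prop := out = patient_counts_alt itemsets patients
instance (itemsets : List (List String)) (patients : List (List String)) (out : List Int) : Decidable (Spec_patient_counts itemsets patients out) := by unfold Spec_patient_counts; infer_instance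

-- ===== CLAIM (what is proved, stated in full; the proofs are below) =====
def Claim_equal_patient_counts : Prop := ∀ (itemsets : List (List String)) (patients : List (List String)), Dom_patient_counts itemsets patients → Spec_patient_counts itemsets patients (patient_counts itemsets patients)


-- ===== LEMMAS AND PROOFS =====

-- lookup after inserting one patient's items: the index at `item` gains index i iff the patient contains item
theorem pc_inner_getD (i : Int) (item : String) :
    ∀ (patient : List String) (d : PySem.Dict String (PySem.Set Int)),
    (patient.foldl (fun d it => d.insert it (PySem.Set.add (d.getD it PySem.Set.empty) i)) d).getD item PySem.Set.empty
      = if patient.contains item then PySem.Set.add (d.getD item PySem.Set.empty) i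
        else d.getD item PySem.Set.empty := by
  intro patient
  induction patient with
  | nil => intro d; simp
  | cons it rest ih =>
    intro d
    rw [List.foldl_cons, ih]
    by_cases h : it = item
    · subst h
      have hg : ((d.insert it (PySem.Set.add (d.getD it PySem.Set.empty) i)).getD it PySem.Set.empty)
          = PySem.Set.add (d.getD it PySem.Set.empty) i := by simp [pysem]
      rw [hg]
      simp
    · have hg : ((d.insert it (PySem.Set.add (d.getD it PySem.Set.empty) i)).getD item PySem.Set.empty)
          = d.getD item PySem.Set.empty := by
        simp [pysem]
        intro he; exact absurd he.symm h
      rw [hg]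
      have : ((it :: rest).contains item) = rest.contains item := by
        simp
        intro he; exact absurd he.symm h
      rw [this]

-- the whole index-building loop: the posting list at `item` is the filtered index list, in order
theorem pc_outer_getD (item : String) :
    ∀ (l : List (Int × List String)) (d : PySem.Dict String (PySem.Set Int)),
    (∀ p ∈ l, p.1 ∉ d.getD item PySem.Set.empty) → (l.map (·.1)).Nodup →
    (l.foldl (fun d p => p.2.foldl (fun d it => d.insert it (PySem.Set.add (d.getD it PySem.Set.empty) p.1)) d) d).getD item PySem.Set.empty
      = d.getD item PySem.Set.empty ++ (l.filter (fun p => p.2.contains item)).map (·.1) := by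
  intro l
  induction l with
  | nil => intro d _ _; simp
  | cons p l ih =>
    intro d hfresh hnd
    rw [List.foldl_cons]
    have hp1 : p.1 ∉ d.getD item PySem.Set.empty := hfresh p (List.mem_cons_self)
    have hnd' : (l.map (·.1)).Nodup := (List.nodup_cons.1 hnd).2
    have hp1l : p.1 ∉ l.map (·.1) := (List.nodup_cons.1 hnd).1
    by_cases hm : item ∈ p.2
    · have hd1 : (p.2.foldl (fun d it => d.insert it (PySem.Set.add (d.getD it PySem.Set.empty) p.1)) d).getD item PySem.Set.empty
          = d.getD item PySem.Set.empty ++ [p.1] := by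
        rw [pc_inner_getD]
        rw [if_pos (by simpa using hm), PySem.Set.add_of_not_mem hp1]
      rw [ih _ ?_ hnd', hd1]
      · simp [hm, List.append_assoc]
      · intro q hq
        rw [hd1]
        intro hmem
        rcases List.mem_append.1 hmem with h1 | h1
        · exact hfresh q (List.mem_cons_of_mem _ hq) h1
        · exact hp1l (by simpa [List.mem_singleton.1 h1] using List.mem_map_of_mem (f := (·.1)) hq)
    · have hd1 : (p.2.foldl (fun d it => d.insert it (PySem.Set.add (d.getD it PySem.Set.empty) p.1)) d).getD item PySem.Set.empty
          = d.getD item PySem.Set.empty := by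
        rw [pc_inner_getD]; rw [if_neg (by simpa using hm)]
      rw [ih _ ?_ hnd', hd1]
      · simp [hm]
      · intro q hq; rw [hd1]; exact hfresh q (List.mem_cons_of_mem _ hq)

theorem pc_nodup_fst (patients : List (List String)) :
    ((PySem.List.enumerate patients).map (·.1)).Nodup := by
  rw [PySem.List.map_fst_enumerate]
  exact PySem.List.nodup_pyRange_one _ _

theorem pcIndex_getD (patients : List (List String)) (item : String) :
    (pcIndex patients).getD item PySem.Set.empty
      = ((PySem.List.enumerate patients).filter (fun p => p.2.contains item)).map (·.1) := by
  unfold pcIndex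
  rw [pc_outer_getD item _ _ (by intro p _ h; simp [pysem] at h) (pc_nodup_fst patients)]
  simp [pysem]

-- membership of an index in a filtered posting list decides the filter's predicate (indices are distinct)
theorem pc_contains_filter_map_fst {l : List (Int × List String)} (hnd : (l.map (·.1)).Nodup)
    {x : Int × List String} (hx : x ∈ l) (q : Int × List String → Bool) :
    ((l.filter q).map (·.1)).contains x.1 = q x := by
  cases hq : q x with
  | false =>
    simp only [List.contains_eq_mem, decide_eq_false_iff_not]
    intro hmem
    rcases List.mem_map.1 hmem with ⟨y, hy, hyx⟩
    have hyl := (List.mem_filter.1 hy).1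
    have hyq := (List.mem_filter.1 hy).2
    have : y = x := List.inj_on_of_nodup_map hnd hyl hx hyx
    rw [this] at hyq; rw [hq] at hyq; exact Bool.false_ne_true hyq
  | true =>
    simp only [List.contains_eq_mem, decide_eq_true_eq]
    exact List.mem_map_of_mem (List.mem_filter.2 ⟨hx, hq⟩)

-- posting-list intersection is the filter by the conjunction
theorem pc_inter_filter (l : List (Int × List String)) (hnd : (l.map (·.1)).Nodup)
    (p q : Int × List String → Bool) :
    PySem.Set.inter ((l.filter p).map (·.1)) ((l.filter q).map (·.1))
      = (l.filter (fun x => p x && q x)).map (·.1) := by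
  have h0 : PySem.Set.inter ((l.filter p).map (·.1)) ((l.filter q).map (·.1))
      = ((l.filter p).map (·.1)).filter (fun x => PySem.Set.contains ((l.filter q).map (·.1)) x) := rfl
  rw [h0]
  simp only [PySem.Set.contains_eq_listContains]
  rw [List.filter_map, List.filter_filter]
  apply congrArg
  apply List.filter_congr
  intro x hx
  rw [Function.comp_apply, pc_contains_filter_map_fst hnd hx q, Bool.and_comm]

-- folding intersections over the remaining items accumulates the conjunction of memberships
theorem pc_fold_inter (l : List (Int × List String)) (hnd : (l.map (·.1)).Nodup) :
    ∀ (rest s : List String),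
    rest.foldl (fun acc it => PySem.Set.inter acc ((l.filter (fun x => x.2.contains it)).map (·.1)))
      ((l.filter (fun x => s.all (fun i => x.2.contains i))).map (·.1))
    = (l.filter (fun x => (s ++ rest).all (fun i => x.2.contains i))).map (·.1) := by
  intro rest
  induction rest with
  | nil => intro s; simp
  | cons it rest ih =>
    intro s
    rw [List.foldl_cons, pc_inter_filter l hnd]
    have hstep : (l.filter (fun x => s.all (fun i => x.2.contains i) && x.2.contains it))
        = l.filter (fun x => (s ++ [it]).all (fun i => x.2.contains i)) := by
      apply List.filter_congr; intro x _; simp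
    rw [hstep, ih (s ++ [it])]
    simp

theorem pc_countP_enumerate (g : List String → Bool) :
    ∀ (ps : List (List String)) (s : Int),
    (PySem.List.enumerate ps s).countP (fun x => g x.2) = ps.countP g := by
  intro ps
  induction ps with
  | nil => intro s; simp [PySem.List.enumerate]
  | cons pt ps ih =>
    intro s
    rw [PySem.List.enumerate_cons, List.countP_cons, List.countP_cons, ih]

-- A's inner count equals B's posting-intersection size, for every itemset
theorem pc_per_itemset (patients : List (List String)) (itemset : List String) :
    (patients.foldl (fun count patient =>
        if itemset.all (fun i => patient.contains i) then count + 1 else count) 0 : Int)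
    = (match itemset with
       | [] => (patients.length : Int)
       | first :: rest =>
         (PySem.Set.len (rest.foldl
            (fun acc item => PySem.Set.inter acc ((pcIndex patients).getD item PySem.Set.empty))
            ((pcIndex patients).getD first PySem.Set.empty)) : Int)) := by
  rw [PySem.List.foldl_count_if]
  cases itemset with
  | nil => simp [List.countP_true]
  | cons first rest =>
    simp only [pcIndex_getD]
    have hfirst : ((PySem.List.enumerate patients).filter (fun p => p.2.contains first)).map (·.1)
        = ((PySem.List.enumerate patients).filter (fun x => [first].all (fun i => x.2.contains i))).map (·.1) := by
      apply congrArg; apply List.filter_congr; intro x _; simp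
    rw [hfirst, pc_fold_inter _ (pc_nodup_fst patients) rest [first]]
    have hlen : (PySem.Set.len (((PySem.List.enumerate patients).filter
          (fun x => ([first] ++ rest).all (fun i => x.2.contains i))).map (·.1)) : Int)
        = ((PySem.List.enumerate patients).countP (fun x => (first :: rest).all (fun i => x.2.contains i)) : Int) := by
      show ((((PySem.List.enumerate patients).filter _).map (·.1)).length : Int) = _
      rw [List.length_map, ← List.countP_eq_length_filter]
      simp
    rw [hlen, pc_countP_enumerate (fun pt => (first :: rest).all fun i => pt.contains i) patients 0]
    simp

-- ===== VERDICT (by name: the statement is the Claim_ definition above) =====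
theorem patient_counts_spec : Claim_equal_patient_counts := by
  intro itemsets patients _
  unfold Spec_patient_counts patient_counts patient_counts_alt
  rw [PySem.List.foldl_append_singleton_eq_map, PySem.List.foldl_append_singleton_eq_map]
  simp only [List.nil_append]
  apply List.map_congr_left
  intro itemset _
  exact pc_per_itemset patients itemset
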